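-- pv_equiv track=rewrite | github.com/Mai-conde/Primer_Parcial_Programacion | CONDENANZA-PARCIAL_Practico/funciones_parcial.py | lista_mayor_promedio
-- ===== SOURCE A (Python) =====
-- def indice_mayor_promedio_por_materia(promedios:list) -> list:
--     '''Documentación:
--     Objetivo: hallar el o los indices que corresponden a las materias con mayor promedio
--
--     Parámetros:
--         promedios (list): lista de promedios de materias
--     retorna:
--         posiciones (list): Lista que contiene a los indices que correspondan a la materia con mayor promedio
--         '''
--     maximo = promedios[0]
--     for i in range(len(promedios)):
--         if promedios[i] > maximo:
--             maximo = promedios[i]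
--     posiciones = [-1]*len(promedios)
--     contador = 0
--     for i in range(len(promedios)):
--         if promedios[i] == maximo:
--             posiciones[contador] = i
--             contador += 1
--     return posiciones
--
-- def lista_mayor_promedio(promedios:list):
--     '''Documentación:
--     Objetivo: crear una nueva lista que solo guarde los indices correspondientes a las materias con mayor promedio
--
--     Parámetros:
--         promedios (list): lista de promedios de materias
--     retorna:
--         posiciones (list): Lista que contiene solo a los indices que correspondan a la materia con mayor promedio
--         '''
--     posiciones = indice_mayor_promedio_por_materia(promedios)
--     contador = 0
--     for dato in posiciones:
--         if dato > -1:
--             contador += 1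
--     lista_max_promedio = [-1]*contador
--
--     j = 0
--     for i in range(len(posiciones)):
--         if posiciones[i] > -1:
--             lista_max_promedio[j] = posiciones[i]
--             j += 1
--     return lista_max_promedio
-- ===== SOURCE B (Python) =====
-- def lista_mayor_promedio(promedios):
--     maximo = None
--     indices = []
--     for i, v in enumerate(promedios):
--         if maximo is None or v > maximo:
--             maximo = v
--             indices = [i]
--         elif v == maximo:
--             indices.append(i)
--     return indices
-- ===== Notes on version B (the rewrite author's own statement) =====
-- stated objective: simpler
-- what changed: B is a single-pass streaming algorithm: it maintains a running maximum and the index list simultaneously, resetting the list whenever a strictly larger value appears and appending on ties, replacing A's separate max pass plus sentinel-pad/count/preallocate/compact construction (one pass, no intermediate lists).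
import Mathlib
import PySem

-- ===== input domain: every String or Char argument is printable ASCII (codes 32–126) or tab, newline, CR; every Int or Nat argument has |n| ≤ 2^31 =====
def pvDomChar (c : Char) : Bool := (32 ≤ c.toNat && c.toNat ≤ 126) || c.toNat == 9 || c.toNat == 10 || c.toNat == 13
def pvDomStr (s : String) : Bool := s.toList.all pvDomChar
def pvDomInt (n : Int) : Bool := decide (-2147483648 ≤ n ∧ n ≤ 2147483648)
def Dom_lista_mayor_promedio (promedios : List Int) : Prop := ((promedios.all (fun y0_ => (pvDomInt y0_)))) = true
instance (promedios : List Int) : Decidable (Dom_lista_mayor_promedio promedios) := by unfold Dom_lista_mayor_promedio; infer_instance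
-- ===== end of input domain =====

-- B replaces A's four staged passes (max scan, sentinel-padded index list, count, compact)
-- by a single streaming pass that carries the running maximum and the index list together,
-- resetting the list on a strictly larger value (objective: simpler; return values proved
-- equal on nonempty lists; A raises IndexError on [], where B returns []).

-- ===== PORT A =====
-- helper: indice_mayor_promedio_por_materia.  promedios[0] is ported as (pyGet? … 0).getD 0:
-- Python raises IndexError there exactly on [], which Pre_ excludes.
def indice_mayor_promedio_por_materia (promedios : List Int) : List Int :=
  let maximo : Int :=
    (PySem.List.pyRange 0 (promedios.length : Int) 1).foldl
      (fun m i => if PySem.List.pyGetD promedios i 0 > m then PySem.List.pyGetD promedios i 0 else m)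
      ((PySem.List.pyGet? promedios 0).getD 0)
  let st : List Int × Int :=
    (PySem.List.pyRange 0 (promedios.length : Int) 1).foldl
      (fun (s : List Int × Int) i =>
        if PySem.List.pyGetD promedios i 0 == maximo
        then (PySem.List.pySetD s.1 s.2 i, s.2 + 1) else s)
      (List.replicate promedios.length (-1), 0)
  st.1

def lista_mayor_promedio (promedios : List Int) : List Int :=
  let posiciones := indice_mayor_promedio_por_materia promedios
  let contador : Int := posiciones.foldl (fun c dato => if dato > -1 then c + 1 else c) 0
  let st : List Int × Int :=
    (PySem.List.pyRange 0 (posiciones.length : Int) 1).foldl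
      (fun (s : List Int × Int) i =>
        if PySem.List.pyGetD posiciones i 0 > -1
        then (PySem.List.pySetD s.1 s.2 (PySem.List.pyGetD posiciones i 0), s.2 + 1) else s)
      (List.replicate contador.toNat (-1), 0)
  st.1

-- ===== PORT B =====
-- the loop body of Source B: state = (maximo : Option Int, indices); the 'maximo is None or
-- v > maximo' / 'elif v == maximo' branch chain, in the same order
def lista_mayor_promedio_step (s : Option Int × List Int) (iv : Int × Int) : Option Int × List Int :=
  match s.1 with
  | none => (some iv.2, [iv.1])
  | some m =>
    if iv.2 > m then (some iv.2, [iv.1])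
    else if iv.2 == m then (some m, s.2 ++ [iv.1])
    else s

def lista_mayor_promedio_alt (promedios : List Int) : List Int :=
  ((PySem.List.enumerate promedios 0).foldl lista_mayor_promedio_step (none, [])).2

-- ===== PRECONDITION & SPEC =====
-- Pre_ excludes exactly the empty list, on which Python A raises IndexError (promedios[0]).
def Pre_lista_mayor_promedio (promedios : List Int) : Prop := promedios ≠ []
instance (promedios : List Int) : Decidable (Pre_lista_mayor_promedio promedios) := by
  unfold Pre_lista_mayor_promedio; infer_instance
def pvWitness_lista_mayor_promedio : List Int := [1, 2, 2]

def Spec_lista_mayor_promedio (promedios : List Int) (out : List Int) : Prop := out = lista_mayor_promedio_alt promedios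
instance (promedios : List Int) (out : List Int) : Decidable (Spec_lista_mayor_promedio promedios out) := by unfold Spec_lista_mayor_promedio; infer_instance

-- ===== CLAIM (what is proved, stated in full; the proofs are below) =====
def Claim_equal_lista_mayor_promedio : Prop := ∀ (promedios : List Int), Dom_lista_mayor_promedio promedios → Pre_lista_mayor_promedio promedios → Spec_lista_mayor_promedio promedios (lista_mayor_promedio promedios)

-- ===== LEMMAS AND PROOFS =====

-- the maximum both programs compute
def M (promedios : List Int) : Int :=
  promedios.foldl (fun m v => if v > m then v else m) ((PySem.List.pyGet? promedios 0).getD 0)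

-- running maximum with a given seed (B's invariant speaks about this)
def foldmax (m : Int) (xs : List Int) : Int :=
  xs.foldl (fun a v => if v > a then v else a) m

-- the intended result: indices whose value equals the maximum
def Matches (promedios : List Int) : List Int :=
  (PySem.List.pyRange 0 (promedios.length : Int) 1).filter
    (fun i => PySem.List.pyGetD promedios i 0 == M promedios)

-- indexing at a positive position in a cons
theorem pyGetD_cons_pos (x d i : Int) (xs : List Int) (h : 0 < i) :
    PySem.List.pyGetD (x :: xs) i d = PySem.List.pyGetD xs (i - 1) d := by
  obtain ⟨n, hn⟩ := Int.eq_ofNat_of_zero_le (by omega : (0:Int) ≤ i - 1)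
  have hi : i = ((n + 1 : Nat) : Int) := by omega
  subst hi
  rw [show ((n + 1 : Nat) : Int) - 1 = ((n : Nat) : Int) by push_cast; ring,
     PySem.List.pyGetD_natCast, PySem.List.pyGetD_natCast]
  simp

theorem set_append_mid (acc t : List Int) (y v : Int) :
    (acc ++ y :: t).set acc.length v = acc ++ v :: t := by
  simp

-- the write-at-counter loop A uses twice: pad with -1, write matches sequentially
theorem fill_spec (p : Int → Bool) :
    ∀ (xs acc : List Int) (k : Nat), (xs.filter p).length ≤ k →
    xs.foldl (fun (s : List Int × Int) x => if p x then (PySem.List.pySetD s.1 s.2 x, s.2 + 1) else s)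
      (acc ++ List.replicate k (-1), (acc.length : Int))
    = (acc ++ xs.filter p ++ List.replicate (k - (xs.filter p).length) (-1),
       (acc.length : Int) + ((xs.filter p).length : Int)) := by
  intro xs
  induction xs with
  | nil => intro acc k h; simp
  | cons x xs ih =>
    intro acc k h
    rw [List.filter_cons] at h ⊢
    by_cases hp : p x
    · simp only [hp, if_true] at h ⊢
      obtain ⟨k', rfl⟩ : ∃ k', k = k' + 1 := ⟨k - 1, by simp at h; omega⟩
      rw [List.foldl_cons]
      simp only [hp, if_true, List.replicate_succ, PySem.List.pySetD_natCast, set_append_mid]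
      have hx : acc ++ x :: List.replicate k' (-1) = (acc ++ [x]) ++ List.replicate k' (-1) := by simp
      have hc : (acc.length : Int) + 1 = (((acc ++ [x]).length : Nat) : Int) := by simp
      rw [hx, hc, ih (acc ++ [x]) k' (by simpa using h)]
      rw [Prod.mk.injEq]
      refine ⟨by simp [Nat.succ_sub_succ_eq_sub], by push_cast [List.length_append, List.length_cons, List.length_nil]; try ring⟩
    · simp only [hp, if_false, Bool.false_eq_true] at h ⊢
      rw [List.foldl_cons]
      simp only [hp, if_false, Bool.false_eq_true]
      exact ih acc k h

-- the matching indices as an enumerate filterMap (shared shape of both results)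
theorem enum_filterMap (m : Int) :
    ∀ (xs : List Int) (s : Int),
    (PySem.List.pyRange s (s + xs.length)).filter (fun i => PySem.List.pyGetD xs (i - s) 0 == m)
    = (PySem.List.enumerate xs s).filterMap (fun iv => if iv.2 == m then some iv.1 else none) := by
  intro xs
  induction xs with
  | nil => intro s; simp [PySem.List.pyRange_one_eq_nil, PySem.List.enumerate_nil]
  | cons x xs ih =>
    intro s
    have hcons : PySem.List.pyRange s (s + ((x :: xs).length : Int))
        = s :: PySem.List.pyRange (s + 1) (s + ((x :: xs).length : Int)) :=
      PySem.List.pyRange_one_cons (by simp only [List.length_cons]; push_cast; omega)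
    have hrange : s + (((x :: xs).length : Nat) : Int) = (s + 1) + ((xs.length : Nat) : Int) := by
      simp only [List.length_cons]; push_cast; omega
    rw [hcons, List.filter_cons]
    have hhead : PySem.List.pyGetD (x :: xs) (s - s) 0 = x := by
      rw [sub_self, PySem.List.pyGetD_zero_cons]
    have hcongr : (PySem.List.pyRange (s + 1) (s + ((x :: xs).length : Int))).filter
          (fun i => PySem.List.pyGetD (x :: xs) (i - s) 0 == m)
        = (PySem.List.pyRange (s + 1) (s + ((x :: xs).length : Int))).filter
          (fun i => PySem.List.pyGetD xs (i - (s + 1)) 0 == m) := by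
      apply List.filter_congr
      intro a ha
      have := (PySem.List.mem_pyRange_one).1 ha
      rw [pyGetD_cons_pos _ _ _ _ (by omega),
         show a - s - 1 = a - (s + 1) by ring]
    rw [hcongr, hrange, ih (s + 1), PySem.List.enumerate_cons, List.filterMap_cons]
    by_cases hx : x == m
    · simp only [hhead, hx, if_true]
    · simp only [hhead, hx, Bool.false_eq_true, if_false]

theorem matches_pos (promedios : List Int) :
    ∀ x ∈ Matches promedios, (-1 : Int) < x := by
  intro x hx
  have h1 := List.mem_of_mem_filter hx
  have h2 := (PySem.List.mem_pyRange_one).1 h1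
  omega

theorem matches_le (promedios : List Int) :
    (Matches promedios).length ≤ promedios.length := by
  unfold Matches
  calc _ ≤ (PySem.List.pyRange 0 (promedios.length : Int) 1).length := List.length_filter_le _ _
    _ = promedios.length := by rw [PySem.List.length_pyRange_one]; simp

-- A's helper returns the matches padded with the -1 sentinels
theorem helper_eq (promedios : List Int) :
    indice_mayor_promedio_por_materia promedios
    = Matches promedios ++ List.replicate (promedios.length - (Matches promedios).length) (-1) := by
  unfold indice_mayor_promedio_por_materia
  rw [PySem.List.foldl_pyRange_zero_pyGetD' promedios 0 (fun m v => if v > m then v else m)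
      ((PySem.List.pyGet? promedios 0).getD 0)]
  rw [show promedios.foldl (fun m v => if v > m then v else m) ((PySem.List.pyGet? promedios 0).getD 0)
      = M promedios from rfl]
  have h2 := fill_spec (fun i => PySem.List.pyGetD promedios i 0 == M promedios)
    (PySem.List.pyRange 0 (promedios.length : Int) 1) [] promedios.length (matches_le promedios)
  simp only [List.nil_append, List.length_nil, Nat.cast_zero] at h2
  simp only []
  rw [h2]
  rfl

theorem portA_eq (promedios : List Int) :
    lista_mayor_promedio promedios = Matches promedios := by
  unfold lista_mayor_promedio
  rw [helper_eq]
  simp only []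
  have hfun : (fun (c : Int) (dato : Int) => if dato > -1 then c + 1 else c)
      = (fun (c : Int) (dato : Int) => if (fun d : Int => decide (d > -1)) dato then c + 1 else c) := by
    funext c d; simp
  rw [hfun, PySem.List.foldl_count_if]
  have hcP : List.countP (fun d : Int => decide (d > -1)) (Matches promedios) = (Matches promedios).length :=
    List.countP_eq_length.mpr (fun x hx => decide_eq_true (matches_pos promedios x hx))
  have hcR : List.countP (fun d : Int => decide (d > -1))
      (List.replicate (promedios.length - (Matches promedios).length) (-1)) = 0 := by
    rw [List.countP_eq_zero]
    intro a ha
    rw [List.eq_of_mem_replicate ha]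
    simp
  rw [List.countP_append, hcP, hcR]
  rw [show ((0 : Int) + (((Matches promedios).length + 0 : Nat) : Int)).toNat
      = (Matches promedios).length by simp]
  rw [PySem.List.foldl_pyRange_zero_pyGetD'
      (Matches promedios ++ List.replicate (promedios.length - (Matches promedios).length) (-1)) 0
      (fun (s : List Int × Int) v => if v > -1 then (PySem.List.pySetD s.1 s.2 v, s.2 + 1) else s)]
  have hfun2 : (fun (s : List Int × Int) (v : Int) => if v > -1 then (PySem.List.pySetD s.1 s.2 v, s.2 + 1) else s)
      = (fun (s : List Int × Int) (v : Int) => if (fun d : Int => decide (d > -1)) v then (PySem.List.pySetD s.1 s.2 v, s.2 + 1) else s) := by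
    funext s v; simp
  rw [hfun2]
  have hfilter : (Matches promedios ++ List.replicate (promedios.length - (Matches promedios).length) (-1)).filter
      (fun d : Int => decide (d > -1)) = Matches promedios := by
    rw [List.filter_append]
    rw [List.filter_eq_self.mpr (fun x hx => decide_eq_true (matches_pos promedios x hx))]
    rw [List.filter_eq_nil_iff.mpr (fun a ha => by rw [List.eq_of_mem_replicate ha]; simp)]
    simp
  have h3 := fill_spec (fun d : Int => decide (d > -1))
    (Matches promedios ++ List.replicate (promedios.length - (Matches promedios).length) (-1)) []
    (Matches promedios).length (by rw [hfilter])
  rw [hfilter] at h3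
  simp only [List.nil_append, List.length_nil, Nat.cast_zero, Nat.sub_self, List.replicate_zero,
    List.append_nil] at h3
  rw [h3]

-- the seed never exceeds the running maximum
theorem le_foldmax : ∀ (xs : List Int) (m : Int), m ≤ foldmax m xs := by
  intro xs
  induction xs with
  | nil => intro m; simp [foldmax]
  | cons x xs ih =>
    intro m
    unfold foldmax
    rw [List.foldl_cons]
    by_cases hx : x > m
    · simp only [hx, if_true]
      exact le_trans (le_of_lt hx) (ih x)
    · simp only [hx, if_false]
      exact ih m

-- B's loop invariant: from state (some m, acc), the pass returns the running maximum and
-- (acc if the maximum did not change, else nothing) followed by the new matching indices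
theorem loopB : ∀ (xs : List Int) (s m : Int) (acc : List Int),
    (PySem.List.enumerate xs s).foldl lista_mayor_promedio_step (some m, acc)
    = (some (foldmax m xs),
       (if m = foldmax m xs then acc else [])
         ++ (PySem.List.enumerate xs s).filterMap
              (fun iv => if iv.2 == foldmax m xs then some iv.1 else none)) := by
  intro xs
  induction xs with
  | nil => intro s m acc; simp [PySem.List.enumerate_nil, foldmax]
  | cons x xs ih =>
    intro s m acc
    rw [PySem.List.enumerate_cons, List.foldl_cons]
    by_cases hx : x > m
    · have hstep : lista_mayor_promedio_step (some m, acc) (s, x) = (some x, [s]) := by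
        simp [lista_mayor_promedio_step, hx]
      have hMx : foldmax m (x :: xs) = foldmax x xs := by
        unfold foldmax; rw [List.foldl_cons]; simp [hx]
      have hne : m ≠ foldmax x xs := by
        have := le_foldmax xs x; omega
      rw [hstep, ih (s + 1) x [s], hMx, if_neg hne, List.nil_append, List.filterMap_cons]
      by_cases hxm : x = foldmax x xs
      · have hb : (x == foldmax x xs) = true := beq_iff_eq.mpr hxm
        simp only [hb, if_pos hxm, if_true, List.singleton_append]
      · have hb : (x == foldmax x xs) = false := beq_eq_false_iff_ne.mpr hxm
        simp only [hb, if_neg hxm, Bool.false_eq_true, if_false, List.nil_append]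
    · have hMm : foldmax m (x :: xs) = foldmax m xs := by
        unfold foldmax; rw [List.foldl_cons]; simp [hx]
      by_cases hxe : x = m
      · have hstep : lista_mayor_promedio_step (some m, acc) (s, x) = (some m, acc ++ [s]) := by
          simp [lista_mayor_promedio_step, hxe]
        rw [hstep, ih (s + 1) m (acc ++ [s]), hMm, List.filterMap_cons]
        by_cases hm : m = foldmax m xs
        · have hb : (x == foldmax m xs) = true := beq_iff_eq.mpr (hxe.trans hm)
          simp only [hb, if_pos hm, if_true, List.append_assoc, List.singleton_append]
        · have hb : (x == foldmax m xs) = false := beq_eq_false_iff_ne.mpr (fun h => hm (hxe ▸ h))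
          simp only [hb, if_neg hm, Bool.false_eq_true, if_false, List.nil_append]
      · have hstep : lista_mayor_promedio_step (some m, acc) (s, x) = (some m, acc) := by
          simp [lista_mayor_promedio_step, hx, hxe]
        have hb : (x == foldmax m xs) = false := by
          have := le_foldmax xs m
          exact beq_eq_false_iff_ne.mpr (by omega)
        rw [hstep, ih (s + 1) m acc, hMm, List.filterMap_cons]
        simp only [hb, Bool.false_eq_true, if_false]

theorem portB_eq (promedios : List Int) :
    lista_mayor_promedio_alt promedios = Matches promedios := by
  unfold lista_mayor_promedio_alt
  cases promedios with
  | nil => simp [PySem.List.enumerate_nil, Matches, PySem.List.pyRange_one_eq_nil]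
  | cons p t =>
    rw [PySem.List.enumerate_cons, List.foldl_cons]
    have hstep : lista_mayor_promedio_step (none, []) (0, p) = (some p, [0]) := by
      simp [lista_mayor_promedio_step]
    rw [hstep, show ((0 : Int) + 1) = 1 by norm_num, loopB t 1 p [0]]
    have hMeq : M (p :: t) = foldmax p t := by
      unfold M foldmax
      rw [List.foldl_cons]
      simp [PySem.List.pyGet?, PySem.List.pyIdx?]
    have hMatches : Matches (p :: t)
        = (PySem.List.enumerate (p :: t) 0).filterMap
            (fun iv => if iv.2 == M (p :: t) then some iv.1 else none) := by
      unfold Matches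
      rw [← enum_filterMap (M (p :: t)) (p :: t) 0]
      simp
    rw [hMatches, PySem.List.enumerate_cons, List.filterMap_cons, hMeq,
       show ((0 : Int) + 1) = 1 by norm_num]
    by_cases hp : p = foldmax p t
    · have hb : (p == foldmax p t) = true := beq_iff_eq.mpr hp
      simp only [hb, if_pos hp, if_true, List.singleton_append]
    · have hb : (p == foldmax p t) = false := beq_eq_false_iff_ne.mpr hp
      simp only [hb, if_neg hp, Bool.false_eq_true, if_false, List.nil_append]

-- ===== VERDICT (by name: the statement is the Claim_ definition above) =====
theorem lista_mayor_promedio_spec : Claim_equal_lista_mayor_promedio := by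
  intro promedios _ _
  unfold Spec_lista_mayor_promedio
  rw [portA_eq, portB_eq]
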